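-- pv_equiv track=rewrite | github.com/bhiriyur/TopCoder | AB.py | countAB
-- ===== SOURCE A (Python) =====
-- def countAB(in_str):
--     n = len(in_str)
--     n_a_b = n_b = 0
--
--     for i in range(n):
--         if in_str[n - i - 1] == 'A':
--             n_a_b += n_b
--         elif in_str[n - i - 1] == 'B':
--             n_b += 1
--         else:
--             raise ValueError('String has to be composed of either A or B')
--
--     return n_a_b
-- ===== SOURCE B (Python) =====
-- def countAB(in_str):
--     # validation pass
--     for c in in_str:
--         if c != 'A' and c != 'B':
--             raise ValueError('String has to be composed of either A or B')
--
--     # divide and conquer: rec(s) = (#AB-pairs in s, #A in s, #B in s);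
--     # pairs(xy) = pairs(x) + pairs(y) + (#A in x) * (#B in y)
--     def rec(s):
--         if len(s) == 0:
--             return (0, 0, 0)
--         if len(s) == 1:
--             return (0, 1 if s == 'A' else 0, 1 if s == 'B' else 0)
--         m = len(s) // 2
--         p1, a1, b1 = rec(s[:m])
--         p2, a2, b2 = rec(s[m:])
--         return (p1 + p2 + a1 * b2, a1 + a2, b1 + b2)
--
--     return rec(in_str)[0]
-- ===== Notes on version B (the rewrite author's own statement) =====
-- stated objective: alternative
-- what changed: B replaces A's single right-to-left accumulator scan with a validation pass followed by a divide-and-conquer recursion on string halves that merges (pairs, #A, #B) triples via pairs(xy)=pairs(x)+pairs(y)+#A(x)*#B(y).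
import Mathlib
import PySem

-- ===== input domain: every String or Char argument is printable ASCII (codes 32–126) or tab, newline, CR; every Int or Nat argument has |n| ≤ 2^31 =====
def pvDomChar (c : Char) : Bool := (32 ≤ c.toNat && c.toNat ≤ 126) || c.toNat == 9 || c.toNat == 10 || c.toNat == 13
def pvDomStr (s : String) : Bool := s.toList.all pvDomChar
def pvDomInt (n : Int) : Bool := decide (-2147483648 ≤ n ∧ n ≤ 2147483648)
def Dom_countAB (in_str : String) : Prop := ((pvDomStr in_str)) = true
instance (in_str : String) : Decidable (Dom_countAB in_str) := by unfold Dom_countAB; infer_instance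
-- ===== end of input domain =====

-- B replaces A's right-to-left accumulator scan with a validation pass plus a
-- divide-and-conquer recursion on halves merging (pairs, #A, #B) triples.

-- ===== PORT A =====
-- A iterates i over range(n) reading in_str[n-i-1], i.e. the characters from last to
-- first: ported as a foldl over the reversed character list with the same state
-- (n_a_b, n_b); the ValueError branch (excluded by Pre_) leaves the state unchanged.
def countAB (in_str : String) : Int :=
  let st := in_str.toList.reverse.foldl
    (fun (st : Int × Int) c =>
      if c = 'A' then (st.1 + st.2, st.2)
      else if c = 'B' then (st.1, st.2 + 1)
      else st)  -- Python raises ValueError here; outside Pre_countAB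
    (0, 0)
  st.1

-- ===== PORT B =====
-- pass 1 of Source B: validity check (the raise is outside Pre_countAB)
def countABValid (l : List Char) : Bool := l.all (fun c => c = 'A' || c = 'B')

-- Source B's rec: divide and conquer returning (#AB-pairs, #A, #B)
def countABRec (l : List Char) : Int × Int × Int :=
  match l with
  | [] => (0, 0, 0)
  | [c] => (0, if c = 'A' then 1 else 0, if c = 'B' then 1 else 0)
  | c1 :: c2 :: rest =>
    -- m = len(s) // 2, inlined
    let r1 := countABRec ((c1 :: c2 :: rest).take ((c1 :: c2 :: rest).length / 2))
    let r2 := countABRec ((c1 :: c2 :: rest).drop ((c1 :: c2 :: rest).length / 2))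
    (r1.1 + r2.1 + r1.2.1 * r2.2.2, r1.2.1 + r2.2.1, r1.2.2 + r2.2.2)
termination_by l.length
decreasing_by
  · simp [List.length_take]; omega
  · simp [List.length_drop]; omega

def countAB_alt (in_str : String) : Int :=
  if countABValid in_str.toList then (countABRec in_str.toList).1
  else 0  -- Python raises ValueError here; outside Pre_countAB

-- ===== PRECONDITION & SPEC =====
-- Pre_ excludes exactly the strings containing a letter other than uppercase a/b, on which A raises ValueError.
def Pre_countAB (in_str : String) : Prop := (in_str.toList.all (fun c => c = 'A' || c = 'B')) = true
instance (in_str : String) : Decidable (Pre_countAB in_str) := by unfold Pre_countAB; infer_instance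
def pvWitness_countAB : String := "AB"

def Spec_countAB (in_str : String) (out : Int) : Prop := out = countAB_alt in_str
instance (in_str : String) (out : Int) : Decidable (Spec_countAB in_str out) := by unfold Spec_countAB; infer_instance

-- ===== CLAIM (what is proved, stated in full; the proofs are below) =====
def Claim_equal_countAB : Prop := ∀ (in_str : String), Dom_countAB in_str → Pre_countAB in_str → Spec_countAB in_str (countAB in_str)

-- ===== LEMMAS AND PROOFS =====

def pvCountB : List Char → Int
  | [] => 0
  | c :: r => (if c = 'B' then 1 else 0) + pvCountB r

-- number of pairs i < j with l[i] = 'A', l[j] = 'B'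
def pvPairs : List Char → Int
  | [] => 0
  | c :: r => (if c = 'A' then pvCountB r else 0) + pvPairs r

def pvCountA : List Char → Int
  | [] => 0
  | c :: r => (if c = 'A' then 1 else 0) + pvCountA r

theorem pvCountA_append (x y : List Char) : pvCountA (x ++ y) = pvCountA x + pvCountA y := by
  induction x with
  | nil => simp [pvCountA]
  | cons c r ih => simp [pvCountA, ih]; ring

theorem pvCountB_append (x y : List Char) : pvCountB (x ++ y) = pvCountB x + pvCountB y := by
  induction x with
  | nil => simp [pvCountB]
  | cons c r ih => simp [pvCountB, ih]; ring

theorem pvPairs_append (x y : List Char) :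
    pvPairs (x ++ y) = pvPairs x + pvPairs y + pvCountA x * pvCountB y := by
  induction x with
  | nil => simp [pvPairs, pvCountA]
  | cons c r ih =>
    simp only [List.cons_append, pvPairs, pvCountA, ih, pvCountB_append]
    by_cases h : c = 'A'
    · simp [h]; ring
    · simp [h]

theorem countABRec_eq (l : List Char) :
    countABRec l = (pvPairs l, pvCountA l, pvCountB l) := by
  induction l using countABRec.induct with
  | case1 => simp [countABRec, pvPairs, pvCountA, pvCountB]
  | case2 c =>
    simp only [countABRec, pvPairs, pvCountA, pvCountB]
    by_cases h : c = 'A' <;> simp [h]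
  | case3 c1 c2 rest ih1 ih2 =>
    rw [countABRec]
    simp only [ih1, ih2]
    have hsplit : (c1 :: c2 :: rest)
        = (c1 :: c2 :: rest).take ((c1 :: c2 :: rest).length / 2)
          ++ (c1 :: c2 :: rest).drop ((c1 :: c2 :: rest).length / 2) :=
      (List.take_append_drop _ _).symm
    conv_rhs => rw [hsplit]
    simp only [pvPairs_append, pvCountA_append, pvCountB_append]

theorem pvFoldA (l : List Char) (p b : Int) :
    l.foldr (fun c (st : Int × Int) =>
      if c = 'A' then (st.1 + st.2, st.2)
      else if c = 'B' then (st.1, st.2 + 1)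
      else st) (p, b)
    = (p + pvPairs l + b * pvCountA l, b + pvCountB l) := by
  induction l with
  | nil => simp [pvPairs, pvCountA, pvCountB]
  | cons c r ih =>
    by_cases hA : c = 'A'
    · subst hA
      rw [List.foldr_cons, ih, if_pos rfl]
      simp only [pvPairs, pvCountA, pvCountB, Prod.mk.injEq, Char.reduceEq, if_true, if_false]
      constructor <;> ring
    · by_cases hB : c = 'B'
      · subst hB
        rw [List.foldr_cons, ih, if_neg (by decide), if_pos rfl]
        simp only [pvPairs, pvCountA, pvCountB, Prod.mk.injEq, Char.reduceEq, if_true, if_false]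
        constructor <;> ring
      · rw [List.foldr_cons, ih, if_neg hA, if_neg hB]
        simp only [pvPairs, pvCountA, pvCountB, Prod.mk.injEq, if_neg hA, if_neg hB]
        constructor <;> ring

-- ===== VERDICT (by name: the statement is the Claim_ definition above) =====
theorem countAB_spec : Claim_equal_countAB := by
  intro s _ hpre
  unfold Pre_countAB at hpre
  unfold Spec_countAB countAB countAB_alt countABValid
  rw [if_pos hpre]
  simp only [List.foldl_reverse]
  have hA := pvFoldA s.toList 0 0
  simp only [zero_mul, zero_add, add_zero] at hA
  rw [hA, countABRec_eq]
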